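-- pv_equiv track=rewrite | github.com/sureshbonda/lottery | numbers_generator.py | check_prime_divisions
-- ===== SOURCE A (Python) =====
-- def check_prime_divisions(win_num):
--     for i in [3, 5, 7, 11, 13, 17, 19, 23, 29, 31]:
--         sum = 0
--         for j in range(5):
--             if win_num[j]%i == 0:
--                 sum += 1
--             if sum >= 3:
--                return False
--     return True
-- ===== SOURCE B (Python) =====
-- _SMALL_PRIME_PRODUCT = 100280245065  # 3*5*7*11*13*17*19*23*29*31
--
-- def _gcd(a, b):
--     a, b = abs(a), abs(b)
--     while b:
--         a, b = b, a % b
--     return a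
--
-- def check_prime_divisions(win_num):
--     # Some small prime divides >= 3 of the five numbers iff some triple of them
--     # has a gcd sharing a factor with the product of those primes.
--     vals = [win_num[j] for j in range(5)]
--     for i in range(5):
--         for j in range(i + 1, 5):
--             for k in range(j + 1, 5):
--                 if _gcd(_gcd(_gcd(vals[i], vals[j]), vals[k]), _SMALL_PRIME_PRODUCT) != 1:
--                     return False
--     return True
-- ===== Notes on version B (the rewrite author's own statement) =====
-- stated objective: alternative
-- what changed: Replaces per-prime divisibility counting entirely: B enumerates the 10 index triples and, via a hand-written Euclidean gcd, checks whether the triple's gcd shares a factor with the fixed product 3*5*...*31; no prime loop, no counters.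
-- outside the precondition, e.g. on check_prime_divisions([3, 6, 9]): A returns False, B raises IndexError
import Mathlib
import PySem

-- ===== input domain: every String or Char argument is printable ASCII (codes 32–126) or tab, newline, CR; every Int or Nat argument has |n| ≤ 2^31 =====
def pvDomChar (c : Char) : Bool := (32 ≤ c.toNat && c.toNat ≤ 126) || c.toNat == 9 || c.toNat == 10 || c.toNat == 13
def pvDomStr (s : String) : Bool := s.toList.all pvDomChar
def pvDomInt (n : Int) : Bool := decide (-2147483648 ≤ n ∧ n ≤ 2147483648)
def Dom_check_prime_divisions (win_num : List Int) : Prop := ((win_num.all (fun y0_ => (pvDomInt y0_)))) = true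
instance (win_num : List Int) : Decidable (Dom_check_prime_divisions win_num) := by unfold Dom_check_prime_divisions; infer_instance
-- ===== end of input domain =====

-- B drops the per-prime counting entirely: it checks, for each of the 10 index triples,
-- whether the triple's gcd (hand-written Euclid) shares a factor with 3*5*...*31.

def pvPrimes : List Int := [3, 5, 7, 11, 13, 17, 19, 23, 29, 31]

-- ===== PORT A =====
-- inner 'for j in range(5)' loop of A, over the remaining indices, carrying 'sum'
def pvAInner (win_num : List Int) (i : Int) : List Int → Int → Bool
  | [], _ => true
  | j :: rest, s =>
    let s' := if PySem.Int.mod (PySem.List.pyGetD win_num j 0) i = 0 then s + 1 else s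
    if 3 ≤ s' then false else pvAInner win_num i rest s'

-- outer 'for i in [3,5,…,31]' loop of A; an inner False propagates as the result
def pvALoop (win_num : List Int) : List Int → Bool
  | [] => true
  | i :: rest =>
    if pvAInner win_num i (PySem.List.pyRange 0 5 1) 0 = false then false
    else pvALoop win_num rest

def check_prime_divisions (win_num : List Int) : Bool :=
  pvALoop win_num pvPrimes

-- ===== PORT B =====
-- B's hand-written Euclid; after 'a, b = abs(a), abs(b)' both are nonnegative and
-- Python's '%' with a positive divisor coincides with Nat '%', so this is exact.
def pvGcdNat (a b : Nat) : Nat :=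
  if b = 0 then a else pvGcdNat b (a % b)
decreasing_by exact Nat.mod_lt _ (Nat.pos_of_ne_zero ‹_›)

def pvGcd (a b : Int) : Int := (pvGcdNat a.natAbs b.natAbs : Int)

def pvPP : Int := 100280245065  -- 3*5*7*11*13*17*19*23*29*31

-- the three nested 'for' loops of B, each with the early 'return False'
def pvB3 (vi vj : Int) (vals : List Int) : List Int → Bool
  | [] => true
  | k :: ks =>
    if pvGcd (pvGcd (pvGcd vi vj) (PySem.List.pyGetD vals k 0)) pvPP ≠ 1 then false
    else pvB3 vi vj vals ks

def pvB2 (vi : Int) (vals : List Int) : List Int → Bool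
  | [] => true
  | j :: js =>
    if pvB3 vi (PySem.List.pyGetD vals j 0) vals (PySem.List.pyRange (j + 1) 5 1) = false then false
    else pvB2 vi vals js

def pvB1 (vals : List Int) : List Int → Bool
  | [] => true
  | i :: is =>
    if pvB2 (PySem.List.pyGetD vals i 0) vals (PySem.List.pyRange (i + 1) 5 1) = false then false
    else pvB1 vals is

def check_prime_divisions_alt (win_num : List Int) : Bool :=
  let vals := (PySem.List.pyRange 0 5 1).map (fun j => PySem.List.pyGetD win_num j 0)
  pvB1 vals (PySem.List.pyRange 0 5 1)

-- ===== PRECONDITION & SPEC =====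
-- Pre_ excludes lists shorter than 5: both programs index win_num[0..4], so A raises
-- IndexError there except in the accidental corner where A's early exit returns False
-- first (three of the present elements divisible by 3), and B raises IndexError on
-- every such short list.
def Pre_check_prime_divisions (win_num : List Int) : Prop := 5 ≤ win_num.length
instance (win_num : List Int) : Decidable (Pre_check_prime_divisions win_num) := by
  unfold Pre_check_prime_divisions; infer_instance
def pvWitness_check_prime_divisions : List Int := [1, 2, 3, 4, 5]

def Spec_check_prime_divisions (win_num : List Int) (out : Bool) : Prop := out = check_prime_divisions_alt win_num
instance (win_num : List Int) (out : Bool) : Decidable (Spec_check_prime_divisions win_num out) := by unfold Spec_check_prime_divisions; infer_instance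

-- ===== CLAIM =====
def Claim_equal_check_prime_divisions : Prop := ∀ (win_num : List Int), Dom_check_prime_divisions win_num → Pre_check_prime_divisions win_num → Spec_check_prime_divisions win_num (check_prime_divisions win_num)

-- ===== LEMMAS AND PROOFS =====

-- the ten index triples (i < j < k) among 0..4, in B's enumeration order
def pvT : List (Int × Int × Int) :=
  [(0,1,2),(0,1,3),(0,1,4),(0,2,3),(0,2,4),(0,3,4),(1,2,3),(1,2,4),(1,3,4),(2,3,4)]

lemma pvRange5 : PySem.List.pyRange 0 5 1 = [0, 1, 2, 3, 4] := by decide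
lemma pvRange15 : PySem.List.pyRange 1 5 1 = [1, 2, 3, 4] := by decide
lemma pvRange25 : PySem.List.pyRange 2 5 1 = [2, 3, 4] := by decide
lemma pvRange35 : PySem.List.pyRange 3 5 1 = [3, 4] := by decide
lemma pvRange45 : PySem.List.pyRange 4 5 1 = [4] := by decide

-- A's inner loop on the five indices counts with early exit; result ↔ total < 3
lemma pvAInner_eq (win_num : List Int) (i : Int) :
    pvAInner win_num i [0, 1, 2, 3, 4] 0 =
      decide ((if PySem.Int.mod (PySem.List.pyGetD win_num 0 0) i = 0 then (1:Int) else 0)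
        + (if PySem.Int.mod (PySem.List.pyGetD win_num 1 0) i = 0 then 1 else 0)
        + (if PySem.Int.mod (PySem.List.pyGetD win_num 2 0) i = 0 then 1 else 0)
        + (if PySem.Int.mod (PySem.List.pyGetD win_num 3 0) i = 0 then 1 else 0)
        + (if PySem.Int.mod (PySem.List.pyGetD win_num 4 0) i = 0 then 1 else 0) < 3) := by
  by_cases h0 : PySem.Int.mod (PySem.List.pyGetD win_num (0:Int) 0) i = 0 <;>
  by_cases h1 : PySem.Int.mod (PySem.List.pyGetD win_num (1:Int) 0) i = 0 <;>
  by_cases h2 : PySem.Int.mod (PySem.List.pyGetD win_num (2:Int) 0) i = 0 <;>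
  by_cases h3 : PySem.Int.mod (PySem.List.pyGetD win_num (3:Int) 0) i = 0 <;>
  by_cases h4 : PySem.Int.mod (PySem.List.pyGetD win_num (4:Int) 0) i = 0 <;>
  simp [pvAInner, h0, h1, h2, h3, h4]

-- A's outer loop is an 'all' over the primes
lemma pvALoop_eq_all (win_num : List Int) (l : List Int) :
    pvALoop win_num l = l.all (fun i => pvAInner win_num i (PySem.List.pyRange 0 5 1) 0) := by
  induction l with
  | nil => rfl
  | cons i rest ih =>
    simp only [pvALoop, List.all_cons, ih]
    cases h : pvAInner win_num i (PySem.List.pyRange 0 5 1) 0 <;> simp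

-- hand-written Euclid computes Nat.gcd
lemma pvGcdNat_eq (a b : Nat) : pvGcdNat a b = Nat.gcd a b := by
  induction b using Nat.strong_induction_on generalizing a with
  | _ b ih =>
    rw [pvGcdNat]
    by_cases h : b = 0
    · simp [h]
    · rw [if_neg h, ih (a % b) (Nat.mod_lt _ (Nat.pos_of_ne_zero h)),
        Nat.gcd_comm b (a % b), ← Nat.gcd_rec b a, Nat.gcd_comm]

lemma pvGcd_eq (a b : Int) : pvGcd a b = (Int.gcd a b : Int) := by
  simp [pvGcd, pvGcdNat_eq, Int.gcd]

-- each nested loop of B is an 'all'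
lemma pvB3_eq_all (vi vj : Int) (vals l : List Int) :
    pvB3 vi vj vals l =
      l.all (fun k => decide (pvGcd (pvGcd (pvGcd vi vj) (PySem.List.pyGetD vals k 0)) pvPP = 1)) := by
  induction l with
  | nil => rfl
  | cons k ks ih =>
    simp only [pvB3, List.all_cons, ih]
    by_cases h : pvGcd (pvGcd (pvGcd vi vj) (PySem.List.pyGetD vals k 0)) pvPP = 1 <;> simp [h]

lemma pvB2_eq_all (vi : Int) (vals l : List Int) :
    pvB2 vi vals l =
      l.all (fun j => pvB3 vi (PySem.List.pyGetD vals j 0) vals (PySem.List.pyRange (j + 1) 5 1)) := by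
  induction l with
  | nil => rfl
  | cons j js ih =>
    simp only [pvB2, List.all_cons, ih]
    cases h : pvB3 vi (PySem.List.pyGetD vals j 0) vals (PySem.List.pyRange (j + 1) 5 1) <;> simp

lemma pvB1_eq_all (vals l : List Int) :
    pvB1 vals l =
      l.all (fun i => pvB2 (PySem.List.pyGetD vals i 0) vals (PySem.List.pyRange (i + 1) 5 1)) := by
  induction l with
  | nil => rfl
  | cons i is ih =>
    simp only [pvB1, List.all_cons, ih]
    cases h : pvB2 (PySem.List.pyGetD vals i 0) vals (PySem.List.pyRange (i + 1) 5 1) <;> simp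

-- divisibility of a triple gcd splits into the three divisibilities
lemma pvDvd_gcd3 (p a b c : Int) :
    p ∣ pvGcd (pvGcd a b) c ↔ (p ∣ a ∧ p ∣ b ∧ p ∣ c) := by
  rw [pvGcd_eq, pvGcd_eq]
  constructor
  · intro h
    have hab : p ∣ (Int.gcd a b : Int) := h.trans (Int.gcd_dvd_left ..)
    exact ⟨hab.trans (Int.gcd_dvd_left ..), hab.trans (Int.gcd_dvd_right ..), h.trans (Int.gcd_dvd_right ..)⟩
  · rintro ⟨ha, hb, hc⟩
    exact Int.dvd_coe_gcd (Int.dvd_coe_gcd ha hb) hc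

-- coprimality with the prime product ↔ no listed prime divides x
lemma pvCoprimePP_iff (x : Int) :
    pvGcd x pvPP = 1 ↔ ∀ p ∈ pvPrimes, ¬ p ∣ x := by
  constructor
  · intro h p hp hpx
    have hfacts : 1 < p ∧ p ∣ pvPP := by
      fin_cases hp <;> exact ⟨by norm_num, by decide⟩
    have : p ∣ pvGcd x pvPP := by
      rw [pvGcd_eq]; exact Int.dvd_coe_gcd hpx hfacts.2
    rw [h] at this
    have := Int.le_of_dvd one_pos this
    omega
  · intro h
    have hq : ∀ q : Nat, Nat.Prime q → ¬ ((q : Nat) : Int) ∣ x → Nat.Coprime x.natAbs q := by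
      intro q hqp hqx
      rw [Nat.coprime_comm]
      refine hqp.coprime_iff_not_dvd.mpr (fun hd => hqx ?_)
      rwa [← Int.natAbs_dvd_natAbs, Int.natAbs_natCast]
    have h3 := hq 3 (by norm_num) (by exact_mod_cast h 3 (by decide))
    have h5 := hq 5 (by norm_num) (by exact_mod_cast h 5 (by decide))
    have h7 := hq 7 (by norm_num) (by exact_mod_cast h 7 (by decide))
    have h11 := hq 11 (by norm_num) (by exact_mod_cast h 11 (by decide))
    have h13 := hq 13 (by norm_num) (by exact_mod_cast h 13 (by decide))
    have h17 := hq 17 (by norm_num) (by exact_mod_cast h 17 (by decide))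
    have h19 := hq 19 (by norm_num) (by exact_mod_cast h 19 (by decide))
    have h23 := hq 23 (by norm_num) (by exact_mod_cast h 23 (by decide))
    have h29 := hq 29 (by norm_num) (by exact_mod_cast h 29 (by decide))
    have h31 := hq 31 (by norm_num) (by exact_mod_cast h 31 (by decide))
    have hcop : Nat.Coprime x.natAbs 100280245065 := by
      have : (100280245065 : Nat) = 3*5*7*11*13*17*19*23*29*31 := by norm_num
      rw [this]
      exact (((((((((h3.mul_right h5).mul_right h7).mul_right h11).mul_right h13).mul_right
        h17).mul_right h19).mul_right h23).mul_right h29).mul_right h31)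
    have : Int.gcd x pvPP = Nat.gcd x.natAbs 100280245065 := by
      simp [Int.gcd, pvPP]
    rw [pvGcd_eq, this, hcop]
    norm_num

-- per prime: the divisibility count is < 3 iff no triple is all-divisible
set_option maxHeartbeats 2000000 in
lemma pvCnt3_forall (p : Int) (f : Int → Int) :
    ((if p ∣ f 0 then (1:Int) else 0) + (if p ∣ f 1 then 1 else 0) + (if p ∣ f 2 then 1 else 0)
      + (if p ∣ f 3 then 1 else 0) + (if p ∣ f 4 then 1 else 0) < 3) ↔
      ∀ t ∈ pvT, ¬(p ∣ f t.1 ∧ p ∣ f t.2.1 ∧ p ∣ f t.2.2) := by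
  simp only [pvT, List.forall_mem_cons]
  by_cases h0 : p ∣ f 0 <;> by_cases h1 : p ∣ f 1 <;> by_cases h2 : p ∣ f 2 <;>
    by_cases h3 : p ∣ f 3 <;> by_cases h4 : p ∣ f 4 <;>
    simp [h0, h1, h2, h3, h4]

-- per triple: the gcd test ↔ no listed prime divides all three
lemma pvTrip_iff (a b c : Int) :
    pvGcd (pvGcd (pvGcd a b) c) pvPP = 1 ↔
      ∀ p ∈ pvPrimes, ¬(p ∣ a ∧ p ∣ b ∧ p ∣ c) := by
  rw [pvCoprimePP_iff]
  refine forall₂_congr fun p _ => ?_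
  rw [pvDvd_gcd3]

-- ===== VERDICT =====
theorem check_prime_divisions_spec : Claim_equal_check_prime_divisions := by
  intro win_num _ _
  unfold Spec_check_prime_divisions
  have hA : (check_prime_divisions win_num = true) ↔
      ∀ p ∈ pvPrimes, ∀ t ∈ pvT,
        ¬(p ∣ PySem.List.pyGetD win_num t.1 0 ∧ p ∣ PySem.List.pyGetD win_num t.2.1 0
          ∧ p ∣ PySem.List.pyGetD win_num t.2.2 0) := by
    rw [check_prime_divisions, pvALoop_eq_all]
    simp only [pvRange5, pvAInner_eq, List.all_eq_true, decide_eq_true_eq,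
      PySem.Int.mod_eq_zero_iff_dvd]
    exact forall₂_congr (fun p _ => pvCnt3_forall p (fun j => PySem.List.pyGetD win_num j 0))
  have hB : (check_prime_divisions_alt win_num = true) ↔
      ∀ t ∈ pvT, ∀ p ∈ pvPrimes,
        ¬(p ∣ PySem.List.pyGetD win_num t.1 0 ∧ p ∣ PySem.List.pyGetD win_num t.2.1 0
          ∧ p ∣ PySem.List.pyGetD win_num t.2.2 0) := by
    rw [check_prime_divisions_alt]
    simp only [pvRange5, List.map_cons, List.map_nil, pvB1_eq_all]
    simp only [List.all_cons, List.all_nil, pvB2_eq_all, pvB3_eq_all]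
    simp [pvRange15, pvRange25, pvRange35, pvRange45, pvTrip_iff, pvT,
      PySem.List.pyGetD_ofNat']
    tauto
  rw [show (check_prime_divisions win_num = check_prime_divisions_alt win_num) ↔
      ((check_prime_divisions win_num = true) ↔ (check_prime_divisions_alt win_num = true)) from
      by constructor <;> intro h <;> [rw [h]; exact Bool.coe_iff_coe.mp h], hA, hB]
  exact ⟨fun h t ht p hp => h p hp t ht, fun h p hp t ht => h t ht p hp⟩
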